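-- pv_equiv track=rewrite | github.com/nroldanf/rosalind | src/dna_tools.py | sequence_counter
-- ===== SOURCE A (Python) =====
-- from typing import Dict, List
--
-- def sequence_counter(sequence: str, vocabulary: List[str]) -> Dict[str, int]:
--     # Iterate and count the number of ocurrences of each token in
--     # the vocabulary.
--     sequence = sequence.upper()
--     counts = {i:0 for i in vocabulary}
--     for symbol in list(sequence):
--         if not symbol in vocabulary:
--             continue
--         counts[symbol] += 1
--     return counts
-- ===== SOURCE B (Python) =====
-- from typing import Dict, List
--
-- def sequence_counter(sequence: str, vocabulary: List[str]) -> Dict[str, int]: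
--     # Loop interchange: for each vocabulary token, count its occurrences among
--     # the sequence's characters (multi-char tokens never equal a char, so 0).
--     chars = list(sequence.upper())
--     return {token: chars.count(token) for token in vocabulary}
-- ===== Notes on version B (the rewrite author's own statement) =====
-- stated objective: simpler
-- what changed: B inverts the traversal: instead of A's scan over the sequence with a per-character vocabulary membership test and in-place dict increments, B builds the result directly as a comprehension over the vocabulary, counting each token's occurrences among the sequence's characters with list.count; there is no mutation pass over the sequence at all.
import Mathlib
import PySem

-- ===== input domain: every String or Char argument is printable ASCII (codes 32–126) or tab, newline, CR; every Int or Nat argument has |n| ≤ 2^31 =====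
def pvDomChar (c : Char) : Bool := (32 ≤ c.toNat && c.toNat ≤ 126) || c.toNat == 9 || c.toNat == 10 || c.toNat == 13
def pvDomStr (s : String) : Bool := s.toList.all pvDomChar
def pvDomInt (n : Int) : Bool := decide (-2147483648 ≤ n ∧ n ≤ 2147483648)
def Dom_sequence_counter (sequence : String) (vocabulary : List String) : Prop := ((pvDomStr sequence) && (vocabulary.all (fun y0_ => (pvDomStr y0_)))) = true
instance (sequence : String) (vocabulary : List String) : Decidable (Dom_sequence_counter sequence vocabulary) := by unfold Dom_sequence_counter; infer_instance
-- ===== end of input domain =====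

-- B inverts the traversal: a comprehension over the vocabulary counting each token among
-- the sequence's characters, instead of A's mutating scan over the sequence (simpler).

-- ===== PORT A =====
-- sequence = sequence.upper(); counts = {i:0 for i in vocabulary};
-- for symbol in list(sequence): if symbol in vocabulary: counts[symbol] += 1
def sequence_counter (sequence : String) (vocabulary : List String) : List (String × Int) :=
  let seq := PySem.Str.upper sequence
  let counts0 : PySem.Dict String Int :=
    vocabulary.foldl (fun d i => d.insert i 0) PySem.Dict.empty
  let counts :=
    (seq.toList.map (fun c => String.ofList [c])).foldl
      (fun d symbol =>
        if vocabulary.contains symbol then d.modify symbol 0 (· + 1) else d)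
      counts0
  counts.items

-- ===== PORT B =====
-- chars = list(sequence.upper()); return {token: chars.count(token) for token in vocabulary}
def sequence_counter_alt (sequence : String) (vocabulary : List String) : List (String × Int) :=
  let chars := (PySem.Str.upper sequence).toList.map (fun c => String.ofList [c])
  (vocabulary.foldl (fun d token => d.insert token ((PySem.List.count chars token : Int))) PySem.Dict.empty).items

-- ===== PRECONDITION & SPEC =====
def Spec_sequence_counter (sequence : String) (vocabulary : List String) (out : List (String × Int)) : Prop := out = sequence_counter_alt sequence vocabulary
instance (sequence : String) (vocabulary : List String) (out : List (String × Int)) : Decidable (Spec_sequence_counter sequence vocabulary out) := by unfold Spec_sequence_counter; infer_instance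

-- ===== CLAIM =====
def Claim_equal_sequence_counter : Prop := ∀ (sequence : String) (vocabulary : List String), Dom_sequence_counter sequence vocabulary → Spec_sequence_counter sequence vocabulary (sequence_counter sequence vocabulary)

-- ===== LEMMAS AND PROOFS =====

-- A's counting loop: every lookup after the loop is the start value plus the guarded count.
lemma getD_A_loop (vocab : List String) (syms : List String) (d : PySem.Dict String Int) (t : String) :
    (syms.foldl (fun d s => if vocab.contains s then d.modify s 0 (· + 1) else d) d).getD t 0
      = d.getD t 0 + (if vocab.contains t then (syms.count t : Int) else 0) := by
  induction syms generalizing d with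
  | nil => simp
  | cons s rest ih =>
    rw [List.foldl_cons]
    by_cases hsv : vocab.contains s
    · rw [if_pos hsv, ih, PySem.Dict.getD_modify, List.count_cons]
      by_cases hts : t = s
      · subst hts
        simp only [hsv, if_pos, beq_self_eq_true]
        push_cast
        ring
      · rw [if_neg hts]
        have hst : (s == t) = false := beq_eq_false_iff_ne.mpr (fun h => hts h.symm)
        simp [hst]
    · rw [if_neg hsv, ih, List.count_cons]
      by_cases hvt : vocab.contains t
      · have hst : (s == t) = false :=
          beq_eq_false_iff_ne.mpr (fun h => hsv (h ▸ hvt))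
        simp [hst]
      · have hvt' : t ∉ vocab := by simpa using hvt
        simp [hvt']

-- A's counting loop keeps the key list when every vocabulary token is already a key.
lemma keys_A_loop (vocab : List String) (syms : List String) (d : PySem.Dict String Int)
    (h : ∀ x, vocab.contains x = true → d.contains x = true) :
    (syms.foldl (fun d s => if vocab.contains s then d.modify s 0 (· + 1) else d) d).keys = d.keys := by
  induction syms generalizing d with
  | nil => rfl
  | cons s rest ih =>
    rw [List.foldl_cons]
    by_cases hsv : vocab.contains s
    · rw [if_pos hsv]
      have hkeys : (d.modify s 0 (· + 1)).keys = d.keys := by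
        rw [PySem.Dict.keys_modify]
        exact PySem.Dict.keys_insert_of_contains (h := h s hsv) ..
      rw [ih (d.modify s 0 (· + 1)) (fun x hx => by
        rw [PySem.Dict.contains_modify]
        simp [h x hx]), hkeys]
    · rw [if_neg hsv]
      exact ih d h

-- lookups in the zero-initialisation dict are all 0
lemma getD_init0 (vocab : List String) (d : PySem.Dict String Int) (t : String)
    (h : d.getD t 0 = 0) :
    (vocab.foldl (fun d i => d.insert i 0) d).getD t 0 = 0 := by
  induction vocab generalizing d with
  | nil => exact h
  | cons a rest ih =>
    rw [List.foldl_cons]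
    refine ih _ ?_
    rw [PySem.Dict.getD_insert]
    split <;> simp [h]

-- every vocabulary token is a key of the initialisation dict
lemma contains_init0 (vocab : List String) (d : PySem.Dict String Int) (x : String)
    (hx : x ∈ vocab ∨ d.contains x = true) :
    (vocab.foldl (fun d i => d.insert i 0) d).contains x = true := by
  induction vocab generalizing d with
  | nil => simpa using hx
  | cons a rest ih =>
    rw [List.foldl_cons]
    refine ih _ ?_
    rcases hx with hx | hx
    · rcases List.mem_cons.mp hx with hx | hx
      · right
        rw [PySem.Dict.contains_insert]
        simp [hx]
      · left; exact hx
    · right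
      rw [PySem.Dict.contains_insert]
      simp [hx]

-- B's comprehension: lookup is f x for vocabulary members, untouched otherwise.
lemma getD_B_loop (f : String → Int) (vocab : List String) (d : PySem.Dict String Int) (x : String) :
    (vocab.foldl (fun d t => d.insert t (f t)) d).getD x 0
      = if x ∈ vocab then f x else d.getD x 0 := by
  induction vocab generalizing d with
  | nil => simp
  | cons a rest ih =>
    rw [List.foldl_cons, ih]
    by_cases hxr : x ∈ rest
    · simp [hxr]
    · rw [if_neg hxr, PySem.Dict.getD_insert]
      by_cases hxa : x = a
      · simp [hxa]
      · simp [hxa, hxr]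

theorem sequence_counter_agree (sequence : String) (vocabulary : List String) :
    sequence_counter sequence vocabulary = sequence_counter_alt sequence vocabulary := by
  unfold sequence_counter sequence_counter_alt
  set syms := (PySem.Str.upper sequence).toList.map (fun c => String.ofList [c]) with hsyms
  set counts0 : PySem.Dict String Int :=
    vocabulary.foldl (fun d i => d.insert i 0) PySem.Dict.empty with hc0
  set dA := syms.foldl
      (fun d symbol => if vocabulary.contains symbol then d.modify symbol 0 (· + 1) else d)
      counts0 with hdA
  set dB := vocabulary.foldl
      (fun d token => d.insert token ((PySem.List.count syms token : Int))) PySem.Dict.empty with hdB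
  have hkA : dA.keys = counts0.keys := by
    rw [hdA]
    exact keys_A_loop _ _ _ (fun x hx => contains_init0 vocabulary _ x (Or.inl (by simpa using hx)))
  have hkeys : dA.keys = dB.keys := by
    rw [hkA, hc0, hdB]
    rw [PySem.Dict.keys_foldl_insert, PySem.Dict.keys_foldl_insert]
  have hndA : dA.keys.Nodup := by
    rw [hkA, hc0]
    exact PySem.Dict.nodup_keys_foldl_insert _ _ _ PySem.Dict.nodup_keys_empty
  have hndB : dB.keys.Nodup := by
    rw [hdB]
    exact PySem.Dict.nodup_keys_foldl_insert _ _ _ PySem.Dict.nodup_keys_empty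
  have hget : ∀ t, dA.getD t 0 = dB.getD t 0 := by
    intro t
    have h0 : counts0.getD t 0 = 0 := by
      rw [hc0]; exact getD_init0 _ _ _ (by simp [PySem.Dict.getD_empty])
    rw [hdA, getD_A_loop, h0, hdB, getD_B_loop (fun t => (PySem.List.count syms t : Int))]
    by_cases hv : t ∈ vocabulary <;> simp [hv, PySem.List.count_eq]
  rw [PySem.Dict.items_eq_map_keys dA hndA 0, PySem.Dict.items_eq_map_keys dB hndB 0, hkeys]
  exact List.map_congr_left (fun k _ => by rw [hget k])

-- ===== VERDICT =====
theorem sequence_counter_spec : Claim_equal_sequence_counter := by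
  intro sequence vocabulary _
  exact sequence_counter_agree sequence vocabulary
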